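-- pv_equiv track=rewrite | github.com/eliottcassidy2000/math | 04-computation/interval_cycle_counts.py | cycle_count_interval
-- ===== SOURCE A (Python) =====
-- from math import comb, factorial
--
-- def co_occ_formula(m, k, d):
--     """THM-143: co_occ_k(d) for Interval tournament."""
--     b_k = comb(m - 2, k - 3)
--     a_k = comb(2*m - 1, k - 2) - comb(m - 1, k - 2) - m * b_k
--     return a_k + b_k * d
--
-- def cycle_count_interval(p, k):
--     """Total number of directed k-cycles in Interval tournament T_p."""
--     m = (p - 1) // 2
--     total = 0
--     for d in range(1, m + 1):
--         total += co_occ_formula(m, k, d)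
--     # Each k-cycle is counted k times (once per vertex), and each pair
--     # {0, d} is counted once. But co_occ_k(d) counts vertex SETS, not
--     # directed cycles. Need to be careful.
--     # co_occ_k(d) = #{k-vertex sets V containing {0,d} that support a HC}
--     # Total vertex sets = (1/C(k,2)) * sum_{d} p * co_occ_k(d)
--     # No wait: each k-vertex set has C(k,2) pairs, and each is counted
--     # once in the sum over d. But we're summing over d=1..m, which only
--     # covers half the pairs (by symmetry co_occ_k(d) = co_occ_k(p-d)).
--     # So: n_0 = (2/(k-1)) * sum_{d=1}^m co_occ_k(d)
--     #     n_total = n_0 * p / k = (2p / (k(k-1))) * sum co_occ_k(d)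
--     # But n_total counts vertex sets, not directed cycles. Each k-vertex
--     # set supports 2*(k-1)!/2 = (k-1)! directed Hamiltonian cycles on it
--     # (for a tournament — actually depends on the specific set).
--     # Hmm, this gets complicated. Let me just count vertex sets.
--     n_0 = 0
--     for d in range(1, m + 1):
--         n_0 += co_occ_formula(m, k, d)
--     # n_0 = number of k-sets containing vertex 0 with a HC
--     # By vertex-transitivity, n_total = n_0 * p / k
--     n_total = n_0 * p // k  # Should be exact integer
--     return n_0, n_total
-- ===== SOURCE B (Python) =====
-- from math import comb
--
-- def cycle_count_interval(p, k):
--     """Closed form: sum_{d=1}^{m} (a_k + b_k*d) = m*a_k + b_k*m(m+1)/2."""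
--     m = (p - 1) // 2
--     if m >= 1:
--         b_k = comb(m - 2, k - 3)
--         a_k = comb(2*m - 1, k - 2) - comb(m - 1, k - 2) - m * b_k
--         n_0 = m * a_k + b_k * (m * (m + 1) // 2)
--     else:
--         n_0 = 0
--     return n_0, n_0 * p // k
-- ===== Notes on version B (the rewrite author's own statement) =====
-- stated objective: faster
-- what changed: B replaces A's two identical O(m) loops summing the affine function co_occ_k(d) = a_k + b_k*d over d = 1..m by the closed-form arithmetic-series value m*a_k + b_k*m(m+1)/2.
import Mathlib
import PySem

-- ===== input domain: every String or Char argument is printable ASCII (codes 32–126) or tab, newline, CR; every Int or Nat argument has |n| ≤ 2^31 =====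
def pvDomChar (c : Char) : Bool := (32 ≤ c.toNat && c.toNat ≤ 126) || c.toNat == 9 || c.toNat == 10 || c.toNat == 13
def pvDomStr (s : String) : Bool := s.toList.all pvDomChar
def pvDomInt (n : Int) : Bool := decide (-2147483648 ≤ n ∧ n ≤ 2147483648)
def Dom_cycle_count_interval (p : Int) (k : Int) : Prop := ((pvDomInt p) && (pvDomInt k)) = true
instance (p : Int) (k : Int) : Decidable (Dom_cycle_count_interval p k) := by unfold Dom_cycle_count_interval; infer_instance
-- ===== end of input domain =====

-- B replaces A's O(m) loop summing the affine co_occ_k(d) by the closed form m*a_k + b_k*m(m+1)/2 (faster).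


-- ===== PORT A =====
-- math.comb ported by hand (shared primitive, used by both ports and never unfolded by
-- the proof): exact for 0 ≤ n, 0 ≤ k — the multiplicative formula keeps the running
-- product equal to C(n-k+i, i), so every Nat division is exact and the result is C(n, k);
-- Python raises ValueError on a negative argument, excluded by Pre_.
def pyComb (n : Int) (k : Int) : Int :=
  if 0 ≤ n ∧ 0 ≤ k then
    if n < k then 0
    else (((List.range k.toNat).foldl
            (fun c i => c * (n.toNat - k.toNat + i + 1) / (i + 1)) 1 : Nat) : Int)
  else 0

def co_occ_formula (m : Int) (k : Int) (d : Int) : Int :=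
  let b_k := pyComb (m - 2) (k - 3)
  let a_k := pyComb (2*m - 1) (k - 2) - pyComb (m - 1) (k - 2) - m * b_k
  a_k + b_k * d

def cycle_count_interval (p : Int) (k : Int) : Int × Int :=
  let m := PySem.Int.floordiv (p - 1) 2
  -- first loop: 'total' is computed and never used, as in A
  let _total := (PySem.List.pyRange 1 (m + 1) 1).foldl (fun acc d => acc + co_occ_formula m k d) 0
  let n_0 := (PySem.List.pyRange 1 (m + 1) 1).foldl (fun acc d => acc + co_occ_formula m k d) 0
  let n_total := PySem.Int.floordiv (n_0 * p) k
  (n_0, n_total)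

-- ===== PORT B =====
def cycle_count_interval_alt (p : Int) (k : Int) : Int × Int :=
  let m := PySem.Int.floordiv (p - 1) 2
  let n_0 :=
    if 1 ≤ m then
      let b_k := pyComb (m - 2) (k - 3)
      let a_k := pyComb (2*m - 1) (k - 2) - pyComb (m - 1) (k - 2) - m * b_k
      m * a_k + b_k * (PySem.Int.floordiv (m * (m + 1)) 2)
    else 0
  (n_0, PySem.Int.floordiv (n_0 * p) k)

-- ===== PRECONDITION & SPEC =====
-- Exactly where A returns: with m = (p-1)//2, either the loop is empty (m ≤ 0, needing only
-- k ≠ 0 for the final division) or m ≥ 2 and k ≥ 3 so every comb argument is nonnegative;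
-- otherwise A raises ValueError (negative comb argument) or ZeroDivisionError (k = 0).
def Pre_cycle_count_interval (p : Int) (k : Int) : Prop :=
  let m := PySem.Int.floordiv (p - 1) 2
  (m ≤ 0 ∧ k ≠ 0) ∨ (2 ≤ m ∧ 3 ≤ k)
instance (p : Int) (k : Int) : Decidable (Pre_cycle_count_interval p k) := by
  unfold Pre_cycle_count_interval; infer_instance

def pvWitness_cycle_count_interval : Int × Int := (7, 3)

def Spec_cycle_count_interval (p : Int) (k : Int) (out : Int × Int) : Prop := out = cycle_count_interval_alt p k
instance (p : Int) (k : Int) (out : Int × Int) : Decidable (Spec_cycle_count_interval p k out) := by unfold Spec_cycle_count_interval; infer_instance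

-- ===== CLAIM (what is proved, stated in full; the proofs are below) =====
def Claim_equal_cycle_count_interval : Prop := ∀ (p : Int) (k : Int), Dom_cycle_count_interval p k → Pre_cycle_count_interval p k → Spec_cycle_count_interval p k (cycle_count_interval p k)

-- ===== LEMMAS AND PROOFS =====

-- triangle-number step, needed by the arithmetic-series induction
lemma tri_succ (n : Nat) : (n + 1) * (n + 2) / 2 = n * (n + 1) / 2 + (n + 1) := by
  obtain ⟨t, ht⟩ := Nat.even_mul_succ_self n
  have h1 : n * (n + 1) = 2 * t := by omega
  have h3 : (n + 1) * (n + 2) = 2 * (t + (n + 1)) := by nlinarith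
  rw [h1, h3, Nat.mul_div_cancel_left _ (by norm_num), Nat.mul_div_cancel_left _ (by norm_num)]

-- sum of the affine function a + b*d over d = 1..n, in closed form
lemma sum_affine (a b : Int) (n : Nat) :
    (PySem.List.pyRange 1 ((n : Int) + 1) 1).foldl (fun acc d => acc + (a + b * d)) 0
      = n * a + b * ((n * (n + 1) / 2 : Nat) : Int) := by
  induction n with
  | zero => simp [PySem.List.pyRange_one_eq_nil]
  | succ n ih =>
    have h : PySem.List.pyRange 1 ((↑(n + 1) : Int) + 1) 1
        = PySem.List.pyRange 1 ((n : Int) + 1) 1 ++ [((n : Int) + 1)] := by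
      have := PySem.List.pyRange_one_succ_right (a := 1) (b := (n : Int) + 1) (by omega)
      push_cast
      push_cast at this
      convert this using 2
    rw [h, List.foldl_append, ih]
    simp only [List.foldl_cons, List.foldl_nil]
    rw [tri_succ]
    push_cast
    ring

theorem cycle_count_interval_spec_aux :
    ∀ (p : Int) (k : Int), Pre_cycle_count_interval p k →
      cycle_count_interval p k = cycle_count_interval_alt p k := by
  intro p k hpre
  unfold Pre_cycle_count_interval at hpre
  unfold cycle_count_interval cycle_count_interval_alt
  dsimp only
  set m := PySem.Int.floordiv (p - 1) 2 with hm
  simp only at hpre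
  rcases hpre with ⟨hm0, _⟩ | ⟨hm2, _⟩
  · -- empty loop, B takes the else branch
    rw [PySem.List.pyRange_one_eq_nil (by omega)]
    simp [if_neg (by omega : ¬ (1 : Int) ≤ m)]
  · -- m ≥ 2: closed form = loop
    obtain ⟨n, hn⟩ : ∃ n : Nat, m = (n : Int) := ⟨m.toNat, by omega⟩
    have hfold :
        (PySem.List.pyRange 1 (m + 1) 1).foldl (fun acc d => acc + co_occ_formula m k d) 0
          = m * (pyComb (2*m - 1) (k - 2) - pyComb (m - 1) (k - 2) - m * pyComb (m - 2) (k - 3))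
            + pyComb (m - 2) (k - 3) * (PySem.Int.floordiv (m * (m + 1)) 2) := by
      have hconv : (fun (acc : Int) (d : Int) => acc + co_occ_formula m k d)
          = fun acc d => acc +
              ((pyComb (2*m - 1) (k - 2) - pyComb (m - 1) (k - 2) - m * pyComb (m - 2) (k - 3))
                + pyComb (m - 2) (k - 3) * d) := by
        funext acc d; simp [co_occ_formula]
      rw [hconv, hn, sum_affine]
      have : PySem.Int.floordiv ((n : Int) * ((n : Int) + 1)) 2
          = ((n * (n + 1) / 2 : Nat) : Int) := by
        have := PySem.Int.floordiv_natCast (n * (n + 1)) 2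
        push_cast at this ⊢
        rw [← this]
      rw [this]
    rw [hfold]
    simp [if_pos (by omega : (1 : Int) ≤ m)]

-- ===== VERDICT (by name: the statement is the Claim_ definition above) =====
theorem cycle_count_interval_spec : Claim_equal_cycle_count_interval := by
  intro p k _ hpre
  exact cycle_count_interval_spec_aux p k hpre
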